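-- pv_equiv track=rewrite | github.com/mortyc126-debug/SHA | crazy32_neutral_cascade.py | compute_de_rounds
-- ===== SOURCE A (Python) =====
-- MASK = 0xFFFFFFFF
--
-- K = [
--     0x428a2f98, 0x71374491, 0xb5c0fbcf, 0xe9b5dba5,
--     0x3956c25b, 0x59f111f1, 0x923f82a4, 0xab1c5ed5,
--     0xd807aa98, 0x12835b01, 0x243185be, 0x550c7dc3,
--     0x72be5d74, 0x80deb1fe, 0x9bdc06a7, 0xc19bf174,
--     0xe49b69c1, 0xefbe4786, 0x0fc19dc6, 0x240ca1cc,
--     0x2de92c6f, 0x4a7484aa, 0x5cb0a9dc, 0x76f988da,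
--     0x983e5152, 0xa831c66d, 0xb00327c8, 0xbf597fc7,
--     0xc6e00bf3, 0xd5a79147, 0x06ca6351, 0x14292967,
--     0x27b70a85, 0x2e1b2138, 0x4d2c6dfc, 0x53380d13,
--     0x650a7354, 0x766a0abb, 0x81c2c92e, 0x92722c85,
--     0xa2bfe8a1, 0xa81a664b, 0xc24b8b70, 0xc76c51a3,
--     0xd192e819, 0xd6990624, 0xf40e3585, 0x106aa070,
--     0x19a4c116, 0x1e376c08, 0x2748774c, 0x34b0bcb5,
--     0x391c0cb3, 0x4ed8aa4a, 0x5b9cca4f, 0x682e6ff3,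
--     0x748f82ee, 0x78a5636f, 0x84c87814, 0x8cc70208,
--     0x90befffa, 0xa4506ceb, 0xbef9a3f7, 0xc67178f2,
-- ]
--
-- IV = [
--     0x6a09e667, 0xbb67ae85, 0x3c6ef372, 0xa54ff53a,
--     0x510e527f, 0x9b05688c, 0x1f83d9ab, 0x5be0cd19,
-- ]
--
-- def rotr(x, n): return ((x >> n) | (x << (32 - n))) & MASK
--
-- def Sig0(x): return rotr(x, 2) ^ rotr(x, 13) ^ rotr(x, 22)
--
-- def Sig1(x): return rotr(x, 6) ^ rotr(x, 11) ^ rotr(x, 25)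
--
-- def sig0(x): return rotr(x, 7) ^ rotr(x, 18) ^ (x >> 3)
--
-- def sig1(x): return rotr(x, 17) ^ rotr(x, 19) ^ (x >> 10)
--
-- def Ch(e, f, g): return ((e & f) ^ (~e & g)) & MASK
--
-- def Maj(a, b, c): return ((a & b) ^ (a & c) ^ (b & c)) & MASK
--
-- def add32(*args):
--     s = 0
--     for a in args: s = (s + a) & MASK
--     return s
--
-- def expand_W(W16, n=25):
--     W = list(W16)
--     for i in range(16, n):
--         W.append(add32(sig1(W[i-2]), W[i-7], sig0(W[i-15]), W[i-16]))
--     return W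
--
-- def sha256_states(W_expanded, n_rounds):
--     """Run SHA-256 for n_rounds, return list of full 8-tuple states after each round."""
--     a, b, c, d, e, f, g, h = IV
--     states = []
--     for i in range(n_rounds):
--         T1 = add32(h, Sig1(e), Ch(e, f, g), K[i], W_expanded[i])
--         T2 = add32(Sig0(a), Maj(a, b, c))
--         h = g; g = f; f = e
--         e = add32(d, T1)
--         d = c; c = b; b = a
--         a = add32(T1, T2)
--         states.append((a, b, c, d, e, f, g, h))
--     return states
--
-- def compute_de_rounds(W, Wp, max_round=20):
--     """Compute De_t (XOR of e registers) for rounds 0..max_round-1."""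
--     We = expand_W(W, max_round)
--     Wpe = expand_W(Wp, max_round)
--     st = sha256_states(We, max_round)
--     stp = sha256_states(Wpe, max_round)
--     des = []
--     for r in range(max_round):
--         des.append(st[r][4] ^ stp[r][4])
--     return des
-- ===== SOURCE B (Python) =====
-- # B: a different decomposition of the same computation.  One generic
-- # single-schedule routine produces the e-register sequence via the two-history
-- # form of SHA-256 (only the a- and e-histories are kept: b,c,d and f,g,h are
-- # just older entries of those histories, so the 8-register octet disappears),
-- # fusing the message expansion into the same round loop; the result is the
-- # element-wise XOR of the two schedules' e-sequences.
-- M32 = 1 << 32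
--
-- K = [
--     0x428a2f98, 0x71374491, 0xb5c0fbcf, 0xe9b5dba5,
--     0x3956c25b, 0x59f111f1, 0x923f82a4, 0xab1c5ed5,
--     0xd807aa98, 0x12835b01, 0x243185be, 0x550c7dc3,
--     0x72be5d74, 0x80deb1fe, 0x9bdc06a7, 0xc19bf174,
--     0xe49b69c1, 0xefbe4786, 0x0fc19dc6, 0x240ca1cc,
--     0x2de92c6f, 0x4a7484aa, 0x5cb0a9dc, 0x76f988da,
--     0x983e5152, 0xa831c66d, 0xb00327c8, 0xbf597fc7,
--     0xc6e00bf3, 0xd5a79147, 0x06ca6351, 0x14292967,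
--     0x27b70a85, 0x2e1b2138, 0x4d2c6dfc, 0x53380d13,
--     0x650a7354, 0x766a0abb, 0x81c2c92e, 0x92722c85,
--     0xa2bfe8a1, 0xa81a664b, 0xc24b8b70, 0xc76c51a3,
--     0xd192e819, 0xd6990624, 0xf40e3585, 0x106aa070,
--     0x19a4c116, 0x1e376c08, 0x2748774c, 0x34b0bcb5,
--     0x391c0cb3, 0x4ed8aa4a, 0x5b9cca4f, 0x682e6ff3,
--     0x748f82ee, 0x78a5636f, 0x84c87814, 0x8cc70208,
--     0x90befffa, 0xa4506ceb, 0xbef9a3f7, 0xc67178f2,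
-- ]
--
-- IV = [
--     0x6a09e667, 0xbb67ae85, 0x3c6ef372, 0xa54ff53a,
--     0x510e527f, 0x9b05688c, 0x1f83d9ab, 0x5be0cd19,
-- ]
--
--
-- def _rot(x, n):
--     return ((x >> n) | (x << (32 - n))) % M32
--
--
-- def _mix(x, rots, shift=None):
--     """xor of rotations of x, optionally xored with a plain right shift."""
--     v = 0
--     for r in rots:
--         v ^= _rot(x, r)
--     if shift is not None:
--         v ^= x >> shift
--     return v
--
--
-- def _e_sequence(W, n):
--     """e-register values after rounds 0..n-1 for one schedule, in the
--     two-history form: aH/eH hold all a- resp. e-values, newest first."""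
--     ws = list(W)
--     aH = [IV[0], IV[1], IV[2], IV[3]]
--     eH = [IV[4], IV[5], IV[6], IV[7]]
--     es = []
--     for t in range(n):
--         if t >= 16:
--             ws.append((_mix(ws[t - 2], (17, 19), 10) + ws[t - 7]
--                        + _mix(ws[t - 15], (7, 18), 3) + ws[t - 16]) % M32)
--         ch = (eH[0] & eH[1]) ^ (~eH[0] & eH[2])
--         t1 = (eH[3] + _mix(eH[0], (6, 11, 25)) + ch + K[t] + ws[t]) % M32
--         maj = (aH[0] & aH[1]) ^ (aH[0] & aH[2]) ^ (aH[1] & aH[2])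
--         a_new = (t1 + _mix(aH[0], (2, 13, 22)) + maj) % M32
--         e_new = (aH[3] + t1) % M32
--         aH.insert(0, a_new)
--         eH.insert(0, e_new)
--         es.append(e_new)
--     return es
--
--
-- def compute_de_rounds(W, Wp, max_round=20):
--     """Compute De_t (XOR of e registers) for rounds 0..max_round-1."""
--     return [e ^ ep for e, ep in zip(_e_sequence(W, max_round),
--                                     _e_sequence(Wp, max_round))]
-- ===== Notes on version B (the rewrite author's own statement) =====
-- stated objective: alternative
-- what changed: Replaces A's four-phase pipeline (pre-expand both schedules, run two full 8-register state-list simulations, then an XOR pass) with a single generic per-schedule routine in the two-history form of SHA-256: only the a- and e-value histories are kept (b,c,d,f,g,h are just older history entries, so the 8-register octet disappears), the message expansion is fused into the round loop, and the result is the element-wise XOR of the two e-sequences.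
import Mathlib
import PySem

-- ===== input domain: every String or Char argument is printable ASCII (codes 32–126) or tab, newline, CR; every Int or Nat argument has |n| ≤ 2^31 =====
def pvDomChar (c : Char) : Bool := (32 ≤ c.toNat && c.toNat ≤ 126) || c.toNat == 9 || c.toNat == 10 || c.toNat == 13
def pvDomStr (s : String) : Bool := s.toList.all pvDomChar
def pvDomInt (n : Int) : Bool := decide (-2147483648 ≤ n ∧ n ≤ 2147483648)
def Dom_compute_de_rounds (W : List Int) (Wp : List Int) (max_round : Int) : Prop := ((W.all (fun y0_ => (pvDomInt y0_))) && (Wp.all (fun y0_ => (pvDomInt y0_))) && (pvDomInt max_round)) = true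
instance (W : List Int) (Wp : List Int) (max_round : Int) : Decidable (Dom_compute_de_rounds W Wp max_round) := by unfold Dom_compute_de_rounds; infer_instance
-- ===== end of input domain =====

-- B uses the two-history form of SHA-256 (only the a- and e-value histories are
-- kept, the 8-register octet disappears), run once per schedule with the message
-- expansion fused into the round loop, and XORs the two e-sequences: 'alternative'.

-- shared module constant (identical literal in Source A and Source B)
def pvK : List Int := [
  0x428a2f98, 0x71374491, 0xb5c0fbcf, 0xe9b5dba5,
  0x3956c25b, 0x59f111f1, 0x923f82a4, 0xab1c5ed5,
  0xd807aa98, 0x12835b01, 0x243185be, 0x550c7dc3,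
  0x72be5d74, 0x80deb1fe, 0x9bdc06a7, 0xc19bf174,
  0xe49b69c1, 0xefbe4786, 0x0fc19dc6, 0x240ca1cc,
  0x2de92c6f, 0x4a7484aa, 0x5cb0a9dc, 0x76f988da,
  0x983e5152, 0xa831c66d, 0xb00327c8, 0xbf597fc7,
  0xc6e00bf3, 0xd5a79147, 0x06ca6351, 0x14292967,
  0x27b70a85, 0x2e1b2138, 0x4d2c6dfc, 0x53380d13,
  0x650a7354, 0x766a0abb, 0x81c2c92e, 0x92722c85,
  0xa2bfe8a1, 0xa81a664b, 0xc24b8b70, 0xc76c51a3,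
  0xd192e819, 0xd6990624, 0xf40e3585, 0x106aa070,
  0x19a4c116, 0x1e376c08, 0x2748774c, 0x34b0bcb5,
  0x391c0cb3, 0x4ed8aa4a, 0x5b9cca4f, 0x682e6ff3,
  0x748f82ee, 0x78a5636f, 0x84c87814, 0x8cc70208,
  0x90befffa, 0xa4506ceb, 0xbef9a3f7, 0xc67178f2]

-- ===== PORT A =====
def pvMASK : Int := 0xFFFFFFFF

def rotr (x : Int) (n : Nat) : Int :=
  PySem.Int.band (PySem.Int.bor (x >>> n) (x <<< (32 - n))) pvMASK

def Sig0 (x : Int) : Int := PySem.Int.bxor (PySem.Int.bxor (rotr x 2) (rotr x 13)) (rotr x 22)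
def Sig1 (x : Int) : Int := PySem.Int.bxor (PySem.Int.bxor (rotr x 6) (rotr x 11)) (rotr x 25)
def sig0 (x : Int) : Int := PySem.Int.bxor (PySem.Int.bxor (rotr x 7) (rotr x 18)) (x >>> (3 : Nat))
def sig1 (x : Int) : Int := PySem.Int.bxor (PySem.Int.bxor (rotr x 17) (rotr x 19)) (x >>> (10 : Nat))

def Ch (e f g : Int) : Int :=
  PySem.Int.band (PySem.Int.bxor (PySem.Int.band e f) (PySem.Int.band (Int.not e) g)) pvMASK

def Maj (a b c : Int) : Int :=
  PySem.Int.band (PySem.Int.bxor (PySem.Int.bxor (PySem.Int.band a b) (PySem.Int.band a c)) (PySem.Int.band b c)) pvMASK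

def add32 (args : List Int) : Int :=
  args.foldl (fun s a => PySem.Int.band (s + a) pvMASK) 0

def expand_W (W16 : List Int) (n : Int) : List Int :=
  (PySem.List.pyRange 16 n 1).foldl
    (fun Wl i =>
      Wl ++ [add32 [sig1 (PySem.List.pyGetD Wl (i - 2) 0), PySem.List.pyGetD Wl (i - 7) 0,
                    sig0 (PySem.List.pyGetD Wl (i - 15) 0), PySem.List.pyGetD Wl (i - 16) 0]])
    W16

def sha_step (W_expanded : List Int)
    (st : (Int × Int × Int × Int × Int × Int × Int × Int) × List (Int × Int × Int × Int × Int × Int × Int × Int))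
    (i : Int) :
    (Int × Int × Int × Int × Int × Int × Int × Int) × List (Int × Int × Int × Int × Int × Int × Int × Int) :=
  let (regs, states) := st
  let (a, b, c, d, e, f, g, h) := regs
  let T1 := add32 [h, Sig1 e, Ch e f g, PySem.List.pyGetD pvK i 0, PySem.List.pyGetD W_expanded i 0]
  let T2 := add32 [Sig0 a, Maj a b c]
  let h := g; let g := f; let f := e
  let e := add32 [d, T1]
  let d := c; let c := b; let b := a
  let a := add32 [T1, T2]
  ((a, b, c, d, e, f, g, h), states ++ [(a, b, c, d, e, f, g, h)])

def sha256_states (W_expanded : List Int) (n_rounds : Int) :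
    List (Int × Int × Int × Int × Int × Int × Int × Int) :=
  -- a, b, c, d, e, f, g, h = IV
  ((PySem.List.pyRange 0 n_rounds 1).foldl (sha_step W_expanded)
    ((0x6a09e667, 0xbb67ae85, 0x3c6ef372, 0xa54ff53a, 0x510e527f, 0x9b05688c, 0x1f83d9ab, 0x5be0cd19),
     ([] : List (Int × Int × Int × Int × Int × Int × Int × Int)))).2

def compute_de_rounds (W : List Int) (Wp : List Int) (max_round : Int) : List Int :=
  let We := expand_W W max_round
  let Wpe := expand_W Wp max_round
  let st := sha256_states We max_round
  let stp := sha256_states Wpe max_round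
  (PySem.List.pyRange 0 max_round 1).foldl
    (fun des r =>
      des ++ [PySem.Int.bxor (PySem.List.pyGetD st r (0,0,0,0,0,0,0,0)).2.2.2.2.1
                             (PySem.List.pyGetD stp r (0,0,0,0,0,0,0,0)).2.2.2.2.1])
    []

-- ===== PORT B =====
def bM : Int := 4294967296

def brot (x : Int) (n : Nat) : Int :=
  PySem.Int.mod (PySem.Int.bor (x >>> n) (x <<< (32 - n))) bM

def bmix (x : Int) (rots : List Nat) (shift : Option Nat) : Int :=
  let v := rots.foldl (fun v r => PySem.Int.bxor v (brot x r)) 0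
  match shift with
  | none => v
  | some s => PySem.Int.bxor v (x >>> s)

-- one round of the two-history loop; list.insert(0, x) is exactly cons
def estep (st : List Int × List Int × List Int × List Int) (t : Int) :
    List Int × List Int × List Int × List Int :=
  let (ws, aH, eH, es) := st
  let ws := if (16 : Int) ≤ t then
      ws ++ [PySem.Int.mod (bmix (PySem.List.pyGetD ws (t - 2) 0) [17, 19] (some 10)
               + PySem.List.pyGetD ws (t - 7) 0
               + bmix (PySem.List.pyGetD ws (t - 15) 0) [7, 18] (some 3)
               + PySem.List.pyGetD ws (t - 16) 0) bM]
    else ws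
  let ch := PySem.Int.bxor
      (PySem.Int.band (PySem.List.pyGetD eH 0 0) (PySem.List.pyGetD eH 1 0))
      (PySem.Int.band (Int.not (PySem.List.pyGetD eH 0 0)) (PySem.List.pyGetD eH 2 0))
  let t1 := PySem.Int.mod (PySem.List.pyGetD eH 3 0
      + bmix (PySem.List.pyGetD eH 0 0) [6, 11, 25] none
      + ch + PySem.List.pyGetD pvK t 0 + PySem.List.pyGetD ws t 0) bM
  let maj := PySem.Int.bxor (PySem.Int.bxor
      (PySem.Int.band (PySem.List.pyGetD aH 0 0) (PySem.List.pyGetD aH 1 0))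
      (PySem.Int.band (PySem.List.pyGetD aH 0 0) (PySem.List.pyGetD aH 2 0)))
      (PySem.Int.band (PySem.List.pyGetD aH 1 0) (PySem.List.pyGetD aH 2 0))
  let aNew := PySem.Int.mod (t1 + bmix (PySem.List.pyGetD aH 0 0) [2, 13, 22] none + maj) bM
  let eNew := PySem.Int.mod (PySem.List.pyGetD aH 3 0 + t1) bM
  (ws, aNew :: aH, eNew :: eH, es ++ [eNew])

def e_sequence (W : List Int) (n : Int) : List Int :=
  ((PySem.List.pyRange 0 n 1).foldl estep
    (W, [0x6a09e667, 0xbb67ae85, 0x3c6ef372, 0xa54ff53a],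
        [0x510e527f, 0x9b05688c, 0x1f83d9ab, 0x5be0cd19], ([] : List Int))).2.2.2

def compute_de_rounds_alt (W : List Int) (Wp : List Int) (max_round : Int) : List Int :=
  List.zipWith PySem.Int.bxor (e_sequence W max_round) (e_sequence Wp max_round)

-- ===== PRECONDITION & SPEC =====
-- Pre_ excludes exactly the inputs where the Python A raises IndexError: a round
-- count above 64 (K[i]), or schedules too short for the rounds requested.
def Pre_compute_de_rounds (W : List Int) (Wp : List Int) (max_round : Int) : Prop :=
  0 < max_round →
    (max_round ≤ 64 ∧ min max_round 16 ≤ (W.length : Int) ∧ min max_round 16 ≤ (Wp.length : Int))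
instance (W : List Int) (Wp : List Int) (max_round : Int) : Decidable (Pre_compute_de_rounds W Wp max_round) := by
  unfold Pre_compute_de_rounds; infer_instance

def pvWitness_compute_de_rounds : List Int × List Int × Int :=
  ([1, 2, 3, 4, 5, 6, 7, 8, 9, 10, 11, 12, 13, 14, 15, 16],
   [0, 0, 0, 0, 0, 0, 0, 0, 0, 0, 0, 0, 0, 0, 0, 0], 20)

def Spec_compute_de_rounds (W : List Int) (Wp : List Int) (max_round : Int) (out : List Int) : Prop :=
  out = compute_de_rounds_alt W Wp max_round
instance (W : List Int) (Wp : List Int) (max_round : Int) (out : List Int) : Decidable (Spec_compute_de_rounds W Wp max_round out) := by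
  unfold Spec_compute_de_rounds; infer_instance

-- ===== CLAIM (what is proved, stated in full; the proofs are below) =====
def Claim_equal_compute_de_rounds : Prop := ∀ (W : List Int) (Wp : List Int) (max_round : Int), Dom_compute_de_rounds W Wp max_round → Pre_compute_de_rounds W Wp max_round → Spec_compute_de_rounds W Wp max_round (compute_de_rounds W Wp max_round)

-- ===== LEMMAS AND PROOFS =====

-- bridges between A's '& 0xFFFFFFFF' and B's '% 2**32'
theorem band_mask (x : Int) : PySem.Int.band x 4294967295 = x % 4294967296 := by
  unfold PySem.Int.band
  by_cases h : 0 ≤ x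
  · rw [if_pos h, if_pos (by norm_num : (0:Int) ≤ 4294967295),
        show ((4294967295:Int)).toNat = 2^32 - 1 from rfl, Nat.and_two_pow_sub_one_eq_mod]
    omega
  · rw [if_neg h, if_pos (by norm_num : (0:Int) ≤ 4294967295),
        show ((4294967295:Int)).toNat = 2^32 - 1 from rfl, Nat.and_comm, Nat.and_two_pow_sub_one_eq_mod]
    omega

theorem mod_m32 (x : Int) : PySem.Int.mod x 4294967296 = x % 4294967296 := by
  unfold PySem.Int.mod
  rw [Int.fmod_eq_emod, if_pos (Or.inl (by norm_num))]
  ring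

theorem brot_eq (x : Int) (n : Nat) : brot x n = rotr x n := by
  unfold brot rotr bM pvMASK
  rw [band_mask, mod_m32]

theorem zero_bxor (a : Int) : PySem.Int.bxor 0 a = a := by
  rw [PySem.Int.bxor_comm]; exact PySem.Int.bxor_zero a

theorem mix_Sig0 (x : Int) : bmix x [2, 13, 22] none = Sig0 x := by
  simp [bmix, Sig0, List.foldl, brot_eq, zero_bxor]

theorem mix_Sig1 (x : Int) : bmix x [6, 11, 25] none = Sig1 x := by
  simp [bmix, Sig1, List.foldl, brot_eq, zero_bxor]

theorem mix_sig0 (x : Int) : bmix x [7, 18] (some 3) = sig0 x := by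
  simp only [bmix, sig0, List.foldl, brot_eq, zero_bxor]

theorem mix_sig1 (x : Int) : bmix x [17, 19] (some 10) = sig1 x := by
  simp only [bmix, sig1, List.foldl, brot_eq, zero_bxor]

theorem add32_two (a b : Int) : add32 [a, b] = (a + b) % 4294967296 := by
  simp only [add32, List.foldl, pvMASK]
  rw [show (0xFFFFFFFF : Int) = 4294967295 from rfl]
  rw [band_mask, band_mask]
  omega

theorem add32_four (a b c d : Int) : add32 [a, b, c, d] = (a + b + c + d) % 4294967296 := by
  simp only [add32, List.foldl, pvMASK]
  rw [show (0xFFFFFFFF : Int) = 4294967295 from rfl]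
  rw [band_mask, band_mask, band_mask, band_mask]
  omega

theorem add32_five (a b c d e : Int) : add32 [a, b, c, d, e] = (a + b + c + d + e) % 4294967296 := by
  simp only [add32, List.foldl, pvMASK]
  rw [show (0xFFFFFFFF : Int) = 4294967295 from rfl]
  rw [band_mask, band_mask, band_mask, band_mask, band_mask]
  omega

theorem Ch_eq (e f g : Int) :
    Ch e f g = (PySem.Int.bxor (PySem.Int.band e f) (PySem.Int.band (Int.not e) g)) % 4294967296 := by
  unfold Ch pvMASK
  rw [show (0xFFFFFFFF : Int) = 4294967295 from rfl, band_mask]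

theorem Maj_eq (a b c : Int) :
    Maj a b c = (PySem.Int.bxor (PySem.Int.bxor (PySem.Int.band a b) (PySem.Int.band a c)) (PySem.Int.band b c)) % 4294967296 := by
  unfold Maj pvMASK
  rw [show (0xFFFFFFFF : Int) = 4294967295 from rfl, band_mask]

-- reference round function (A's round, reads of K and W abstracted)
def rnd (a b c d e f g h k w : Int) : Int × Int × Int × Int × Int × Int × Int × Int :=
  let T1 := add32 [h, Sig1 e, Ch e f g, k, w]
  let T2 := add32 [Sig0 a, Maj a b c]
  (add32 [T1, T2], a, b, c, add32 [d, T1], e, f, g)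

-- the word A's expansion appends at step i
def nextW (ws : List Int) (i : Int) : Int :=
  add32 [sig1 (PySem.List.pyGetD ws (i - 2) 0), PySem.List.pyGetD ws (i - 7) 0,
         sig0 (PySem.List.pyGetD ws (i - 15) 0), PySem.List.pyGetD ws (i - 16) 0]

-- B's fused expansion word is the same value
theorem bword_eq (ws : List Int) (i : Int) :
    PySem.Int.mod (bmix (PySem.List.pyGetD ws (i - 2) 0) [17, 19] (some 10)
      + PySem.List.pyGetD ws (i - 7) 0
      + bmix (PySem.List.pyGetD ws (i - 15) 0) [7, 18] (some 3)
      + PySem.List.pyGetD ws (i - 16) 0) bM = nextW ws i := by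
  unfold nextW bM
  rw [mod_m32, mix_sig1, mix_sig0, add32_four]

-- the expanded schedule after j appends (reference form of both expansions)
def extN (W : List Int) : Nat → List Int
  | 0 => W
  | j + 1 => extN W j ++ [nextW (extN W j) (16 + (j : Int))]

-- canonical value of the r-th schedule word
def cw (W : List Int) (r : Nat) : Int := PySem.List.pyGetD (extN W r) (r : Int) 0

-- register octet after r rounds, fed by word function wf
def regsIter (wf : Nat → Int) : Nat → Int × Int × Int × Int × Int × Int × Int × Int
  | 0 => (0x6a09e667, 0xbb67ae85, 0x3c6ef372, 0xa54ff53a, 0x510e527f, 0x9b05688c, 0x1f83d9ab, 0x5be0cd19)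
  | r + 1 =>
    let p := regsIter wf r
    rnd p.1 p.2.1 p.2.2.1 p.2.2.2.1 p.2.2.2.2.1 p.2.2.2.2.2.1 p.2.2.2.2.2.2.1 p.2.2.2.2.2.2.2
      (PySem.List.pyGetD pvK (r : Int) 0) (wf r)

-- reference output
def desN (W Wp : List Int) : Nat → List Int
  | 0 => []
  | r + 1 => desN W Wp r ++
      [PySem.Int.bxor (regsIter (cw W) (r + 1)).2.2.2.2.1 (regsIter (cw Wp) (r + 1)).2.2.2.2.1]

theorem extN_length (W : List Int) (j : Nat) : (extN W j).length = W.length + j := by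
  induction j with
  | zero => simp [extN]
  | succ j ih => simp [extN, ih]; omega

theorem extN_prefix (W : List Int) {j j' : Nat} (h : j ≤ j') : (extN W j) <+: (extN W j') := by
  induction j' with
  | zero => interval_cases j; exact List.prefix_refl _
  | succ j' ih =>
    rcases Nat.lt_or_ge j (j' + 1) with h' | h'
    · exact (ih (by omega)).trans ⟨_, rfl⟩
    · have : j = j' + 1 := by omega
      subst this; exact List.prefix_refl _

theorem getD_of_prefix {xs ys : List Int} (r : Nat) (h : r < xs.length) (hp : xs <+: ys) :
    PySem.List.pyGetD ys (r : Int) 0 = PySem.List.pyGetD xs (r : Int) 0 := by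
  obtain ⟨t, rfl⟩ := hp
  simp [PySem.List.pyGetD_natCast, List.getD]
  rw [List.getElem?_append_left h]

theorem extN_stable (W : List Int) {j j' : Nat} (r : Nat)
    (h1 : r < W.length + j) (h2 : r < W.length + j') :
    PySem.List.pyGetD (extN W j) (r : Int) 0 = PySem.List.pyGetD (extN W j') (r : Int) 0 := by
  rcases le_total j j' with h | h
  · rw [getD_of_prefix r (by rw [extN_length]; omega) (extN_prefix W h)]
  · rw [getD_of_prefix r (by rw [extN_length]; omega) (extN_prefix W h)]

theorem getD_extN_eq_cw (W : List Int) {j r : Nat}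
    (h1 : r < W.length + j) (h2 : 0 < W.length) :
    PySem.List.pyGetD (extN W j) (r : Int) 0 = cw W r :=
  extN_stable W r h1 (by omega)

theorem expand_eq_extN (W : List Int) (m : Int) : expand_W W m = extN W (m - 16).toNat := by
  unfold expand_W
  rw [PySem.List.pyRange_one, List.foldl_map]
  generalize (m - 16).toNat = n
  induction n with
  | zero => simp [extN]
  | succ n ih =>
    rw [List.range_succ, List.foldl_append, ih]
    simp only [List.foldl_cons, List.foldl_nil]
    show _ = extN W n ++ [nextW (extN W n) (16 + (n : Int))]
    unfold nextW
    norm_num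

theorem sha_step_eq (we : List Int) (p : Int × Int × Int × Int × Int × Int × Int × Int)
    (l : List (Int × Int × Int × Int × Int × Int × Int × Int)) (i : Int) :
    sha_step we (p, l) i =
      (rnd p.1 p.2.1 p.2.2.1 p.2.2.2.1 p.2.2.2.2.1 p.2.2.2.2.2.1 p.2.2.2.2.2.2.1 p.2.2.2.2.2.2.2
         (PySem.List.pyGetD pvK i 0) (PySem.List.pyGetD we i 0),
       l ++ [rnd p.1 p.2.1 p.2.2.1 p.2.2.2.1 p.2.2.2.2.1 p.2.2.2.2.2.1 p.2.2.2.2.2.2.1 p.2.2.2.2.2.2.2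
         (PySem.List.pyGetD pvK i 0) (PySem.List.pyGetD we i 0)]) := by
  rcases p with ⟨a, b, c, d, e, f, g, h⟩
  rfl

theorem sha_aux (W : List Int) (n : Nat) (hL : min n 16 ≤ W.length) (k : Nat) (hk : k ≤ n) :
    (List.range k).foldl (fun st (r : Nat) => sha_step (extN W (n - 16)) st ((0 : Int) + r))
      ((0x6a09e667, 0xbb67ae85, 0x3c6ef372, 0xa54ff53a, 0x510e527f, 0x9b05688c, 0x1f83d9ab, 0x5be0cd19),
       ([] : List (Int × Int × Int × Int × Int × Int × Int × Int)))
      = (regsIter (cw W) k, (List.range k).map (fun r => regsIter (cw W) (r + 1))) := by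
  induction k with
  | zero => simp [regsIter]
  | succ k ih =>
    rw [List.range_succ, List.foldl_append, ih (by omega)]
    simp only [List.foldl_cons, List.foldl_nil]
    rw [sha_step_eq]
    have hw : PySem.List.pyGetD (extN W (n - 16)) ((0 : Int) + (k : Nat)) 0 = cw W k := by
      rw [zero_add]
      exact getD_extN_eq_cw W (by omega) (by omega)
    rw [hw, Prod.mk.injEq]
    refine ⟨?_, ?_⟩
    · simp only [regsIter, zero_add]
    · rw [List.map_append]
      simp only [List.map_cons, List.map_nil, regsIter, zero_add]

theorem sha_eq_regsIter (W : List Int) (m : Int) (hL : min m.toNat 16 ≤ W.length) :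
    sha256_states (extN W (m - 16).toNat) m =
      (List.range m.toNat).map (fun r => regsIter (cw W) (r + 1)) := by
  unfold sha256_states
  rw [PySem.List.pyRange_one, List.foldl_map]
  have h1 : (m - 0).toNat = m.toNat := by omega
  have h2 : (m - 16).toNat = m.toNat - 16 := by omega
  rw [h1, h2, sha_aux W m.toNat hL m.toNat le_rfl]

theorem getD_map_range {α : Type} (f : Nat → α) (z : α) {r n : Nat} (h : r < n) :
    PySem.List.pyGetD ((List.range n).map f) ((0 : Int) + r) z = f r := by
  rw [zero_add]
  simp [PySem.List.pyGetD_natCast, List.getD, h]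

theorem desA_aux (W Wp : List Int) (n k : Nat) (hk : k ≤ n) :
    (List.range k).foldl
      (fun des (r : Nat) => des ++
        [PySem.Int.bxor
          (PySem.List.pyGetD ((List.range n).map (fun r => regsIter (cw W) (r + 1))) ((0 : Int) + r)
            (0, 0, 0, 0, 0, 0, 0, 0)).2.2.2.2.1
          (PySem.List.pyGetD ((List.range n).map (fun r => regsIter (cw Wp) (r + 1))) ((0 : Int) + r)
            (0, 0, 0, 0, 0, 0, 0, 0)).2.2.2.2.1]) []
      = desN W Wp k := by
  induction k with
  | zero => simp [desN]
  | succ k ih =>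
    rw [List.range_succ, List.foldl_append, ih (by omega)]
    simp only [List.foldl_cons, List.foldl_nil]
    rw [getD_map_range _ _ (by omega : k < n), getD_map_range _ _ (by omega : k < n)]
    simp [desN]

theorem portA_eq_desN (W Wp : List Int) (m : Int)
    (hL : min m.toNat 16 ≤ W.length) (hLp : min m.toNat 16 ≤ Wp.length) :
    compute_de_rounds W Wp m = desN W Wp m.toNat := by
  simp only [compute_de_rounds]
  rw [expand_eq_extN, expand_eq_extN, sha_eq_regsIter W m hL, sha_eq_regsIter Wp m hLp,
    PySem.List.pyRange_one, List.foldl_map]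
  have h1 : (m - 0).toNat = m.toNat := by omega
  rw [h1]
  exact desA_aux W Wp m.toNat m.toNat le_rfl

-- ===== B side: the two-history loop agrees with the register reference =====

-- B's t1 equals A's T1 on the same registers and word
theorem t1_eq (e f g h k w : Int) :
    PySem.Int.mod (h + bmix e [6, 11, 25] none
      + PySem.Int.bxor (PySem.Int.band e f) (PySem.Int.band (Int.not e) g)
      + k + w) bM
      = add32 [h, Sig1 e, Ch e f g, k, w] := by
  unfold bM
  rw [mod_m32, mix_Sig1, add32_five, Ch_eq]
  omega

-- B's new a equals A's add32(T1, T2)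
theorem aNew_eq (a b c T1 : Int) :
    PySem.Int.mod (T1 + bmix a [2, 13, 22] none
      + PySem.Int.bxor (PySem.Int.bxor (PySem.Int.band a b) (PySem.Int.band a c)) (PySem.Int.band b c)) bM
      = add32 [T1, add32 [Sig0 a, Maj a b c]] := by
  unfold bM
  rw [mod_m32, mix_Sig0, add32_two, add32_two, Maj_eq]
  omega

-- B's new e equals A's add32(d, T1)
theorem eNew_eq (d T1 : Int) : PySem.Int.mod (d + T1) bM = add32 [d, T1] := by
  unfold bM
  rw [mod_m32, add32_two]

theorem eseq_aux (W : List Int) (n : Nat) (hL : min n 16 ≤ W.length) (k : Nat) (hk : k ≤ n) :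
    ∃ ta te,
      (List.range k).foldl (fun st (r : Nat) => estep st ((0 : Int) + r))
        (W, [0x6a09e667, 0xbb67ae85, 0x3c6ef372, 0xa54ff53a],
            [0x510e527f, 0x9b05688c, 0x1f83d9ab, 0x5be0cd19], ([] : List Int))
        = (extN W (k - 16),
           (regsIter (cw W) k).1 :: (regsIter (cw W) k).2.1 :: (regsIter (cw W) k).2.2.1 ::
             (regsIter (cw W) k).2.2.2.1 :: ta,
           (regsIter (cw W) k).2.2.2.2.1 :: (regsIter (cw W) k).2.2.2.2.2.1 ::
             (regsIter (cw W) k).2.2.2.2.2.2.1 :: (regsIter (cw W) k).2.2.2.2.2.2.2 :: te,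
           (List.range k).map (fun r => (regsIter (cw W) (r + 1)).2.2.2.2.1)) := by
  induction k with
  | zero =>
    refine ⟨[], [], ?_⟩
    simp [extN, regsIter]
  | succ k ih =>
    obtain ⟨ta, te, ih⟩ := ih (by omega)
    rw [List.range_succ, List.foldl_append, ih]
    simp only [List.foldl_cons, List.foldl_nil]
    refine ⟨(regsIter (cw W) k).2.2.2.1 :: ta, (regsIter (cw W) k).2.2.2.2.2.2.2 :: te, ?_⟩
    simp only [estep]
    simp only [PySem.List.pyGetD_ofNat', List.getD_cons_zero, List.getD_cons_succ]
    rw [bword_eq]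
    by_cases h16 : (16 : Int) ≤ (0 : Int) + (k : Nat)
    · rw [if_pos h16]
      have hweW : extN W (k - 16) ++ [nextW (extN W (k - 16)) ((0 : Int) + (k : Nat))]
          = extN W (k + 1 - 16) := by
        have hs : k + 1 - 16 = (k - 16) + 1 := by omega
        have hc : (16 + ((k - 16 : Nat) : Int)) = (0 : Int) + (k : Nat) := by omega
        rw [hs]
        show _ = extN W (k - 16) ++ [nextW (extN W (k - 16)) (16 + ((k - 16 : Nat) : Int))]
        rw [hc]
      rw [hweW]
      have hword : PySem.List.pyGetD (extN W (k + 1 - 16)) ((0 : Int) + (k : Nat)) 0 = cw W k := by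
        rw [zero_add]; exact getD_extN_eq_cw W (by omega) (by omega)
      rw [hword, t1_eq, aNew_eq, eNew_eq]
      simp only [zero_add, regsIter, rnd, List.map_append, List.map_cons, List.map_nil]
    · rw [if_neg h16]
      have hkz : k - 16 = 0 := by omega
      have hkz' : k + 1 - 16 = 0 := by omega
      rw [hkz, hkz']
      have hword : PySem.List.pyGetD (extN W 0) ((0 : Int) + (k : Nat)) 0 = cw W k := by
        rw [zero_add]; exact getD_extN_eq_cw W (by omega) (by omega)
      rw [hword, t1_eq, aNew_eq, eNew_eq]
      simp only [zero_add, regsIter, rnd, List.map_append, List.map_cons, List.map_nil]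

theorem eseq_eq (W : List Int) (m : Int) (hL : min m.toNat 16 ≤ W.length) :
    e_sequence W m = (List.range m.toNat).map (fun r => (regsIter (cw W) (r + 1)).2.2.2.2.1) := by
  unfold e_sequence
  rw [PySem.List.pyRange_one, List.foldl_map]
  have h1 : (m - 0).toNat = m.toNat := by omega
  rw [h1]
  obtain ⟨ta, te, h⟩ := eseq_aux W m.toNat hL m.toNat le_rfl
  rw [h]

theorem desN_eq_map (W Wp : List Int) (n : Nat) :
    desN W Wp n = (List.range n).map
      (fun r => PySem.Int.bxor (regsIter (cw W) (r + 1)).2.2.2.2.1 (regsIter (cw Wp) (r + 1)).2.2.2.2.1) := by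
  induction n with
  | zero => simp [desN]
  | succ n ih => rw [List.range_succ, List.map_append]; simp [desN, ih]

theorem portB_eq_desN (W Wp : List Int) (m : Int)
    (hL : min m.toNat 16 ≤ W.length) (hLp : min m.toNat 16 ≤ Wp.length) :
    compute_de_rounds_alt W Wp m = desN W Wp m.toNat := by
  unfold compute_de_rounds_alt
  rw [eseq_eq W m hL, eseq_eq Wp m hLp, List.zipWith_map, List.zipWith_self, desN_eq_map]

-- ===== VERDICT (by name: the statement is the Claim_ definition above) =====
theorem compute_de_rounds_spec : Claim_equal_compute_de_rounds := by
  intro W Wp m _ hpre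
  have hL : min m.toNat 16 ≤ W.length := by
    rcases Nat.lt_or_ge 0 m.toNat with h | h
    · have := hpre (by omega); omega
    · omega
  have hLp : min m.toNat 16 ≤ Wp.length := by
    rcases Nat.lt_or_ge 0 m.toNat with h | h
    · have := hpre (by omega); omega
    · omega
  unfold Spec_compute_de_rounds
  rw [portA_eq_desN W Wp m hL hLp, portB_eq_desN W Wp m hL hLp]
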